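-- pv_equiv track=rewrite | github.com/mambrozic/764project | SCORES/SCORESInput.py | reshuffle
-- ===== SOURCE A (Python) =====
-- def reshuffle(boxes, syms, labels, objs):
--     new_boxes = []
--     new_syms = []
--     new_labels = []
--     new_objs = []
--     for box, sym, label, obj in zip(boxes, syms, labels, objs):
--         if sym[0] == 10.:
--             new_boxes.append(box)
--             new_syms.append(sym)
--             new_labels.append(label)
--             new_objs.append(obj)
--         else:
--             new_boxes = [box] + new_boxes
--             new_syms = [sym] + new_syms
--             new_labels = [label] + new_labels
--             new_objs = [obj] + new_objs
--     return new_boxes, new_syms, new_labels, new_objs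
-- ===== SOURCE B (Python) =====
-- def reshuffle(boxes, syms, labels, objs):
--     flagged = []
--     rest = []
--     for quad in zip(boxes, syms, labels, objs):
--         if quad[1][0] == 10.:
--             flagged.append(quad)
--         else:
--             rest.append(quad)
--     ordered = rest[::-1] + flagged
--     return ([q[0] for q in ordered], [q[1] for q in ordered],
--             [q[2] for q in ordered], [q[3] for q in ordered])
-- ===== Notes on version B (the rewrite author's own statement) =====
-- stated objective: alternative
-- what changed: Single pass splitting the zipped quadruples into a flagged and a non-flagged group, then one reverse and one concatenation, instead of A's in-loop append/copy-prepend on four parallel accumulators.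
import Mathlib
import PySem

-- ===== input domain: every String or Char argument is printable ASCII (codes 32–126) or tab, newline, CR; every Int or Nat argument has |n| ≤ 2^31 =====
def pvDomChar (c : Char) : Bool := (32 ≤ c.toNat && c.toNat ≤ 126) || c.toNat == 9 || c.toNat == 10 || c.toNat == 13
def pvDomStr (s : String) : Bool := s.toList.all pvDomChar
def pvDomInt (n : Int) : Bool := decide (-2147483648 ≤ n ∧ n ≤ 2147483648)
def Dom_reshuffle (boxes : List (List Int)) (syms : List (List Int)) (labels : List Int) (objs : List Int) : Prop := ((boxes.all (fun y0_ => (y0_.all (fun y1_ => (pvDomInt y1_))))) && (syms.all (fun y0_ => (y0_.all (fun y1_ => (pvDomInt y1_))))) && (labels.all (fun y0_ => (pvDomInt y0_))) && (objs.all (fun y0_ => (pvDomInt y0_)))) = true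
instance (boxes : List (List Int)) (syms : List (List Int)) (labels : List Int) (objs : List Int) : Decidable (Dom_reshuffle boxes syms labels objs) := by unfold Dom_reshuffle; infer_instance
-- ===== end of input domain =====

-- B replaces A's per-element list-copying prepend with one split pass, a reverse and a concatenation.

-- shared: Python's zip over the four parallel lists (truncates to the shortest)
def pvZip4 (boxes : List (List Int)) (syms : List (List Int)) (labels : List Int) (objs : List Int) :
    List (List Int × List Int × Int × Int) :=
  boxes.zip (syms.zip (labels.zip objs))

-- ===== PORT A =====
-- A's loop: four accumulators; append on sym[0] == 10, copy-prepend otherwise.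
-- sym[0] is ported as headI: Pre_reshuffle guarantees every accessed sym is nonempty,
-- where headI coincides with Python's sym[0] (A raises IndexError on an empty sym).
def reshuffleLoop : List (List Int × List Int × Int × Int) →
    List (List Int) × List (List Int) × List Int × List Int →
    List (List Int) × List (List Int) × List Int × List Int
  | [], st => st
  | (b, s, l, o) :: rest, (nb, ns, nl, no) =>
    if s.headI == 10 then
      reshuffleLoop rest (nb ++ [b], ns ++ [s], nl ++ [l], no ++ [o])
    else
      reshuffleLoop rest ([b] ++ nb, [s] ++ ns, [l] ++ nl, [o] ++ no)

def reshuffle (boxes : List (List Int)) (syms : List (List Int)) (labels : List Int) (objs : List Int) : List (List Int) × List (List Int) × List Int × List Int :=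
  reshuffleLoop (pvZip4 boxes syms labels objs) ([], [], [], [])

-- ===== PORT B =====
-- B's split pass over the quadruples (quad[1][0] ported as headI, exact on Pre_).
def reshuffleSplit : List (List Int × List Int × Int × Int) →
    List (List Int × List Int × Int × Int) × List (List Int × List Int × Int × Int)
  | [] => ([], [])
  | q :: rest =>
    let p := reshuffleSplit rest
    if q.2.1.headI == 10 then (q :: p.1, p.2) else (p.1, q :: p.2)

def reshuffle_alt (boxes : List (List Int)) (syms : List (List Int)) (labels : List Int) (objs : List Int) : List (List Int) × List (List Int) × List Int × List Int :=
  let p := reshuffleSplit (pvZip4 boxes syms labels objs)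
  let ordered := p.2.reverse ++ p.1
  (ordered.map (·.1), ordered.map (·.2.1), ordered.map (·.2.2.1), ordered.map (·.2.2.2))

-- ===== PRECONDITION & SPEC =====
-- Pre_ excludes exactly the inputs on which Python A raises IndexError: a sym list
-- that is empty within the zipped (shortest-length) prefix.
def Pre_reshuffle (boxes : List (List Int)) (syms : List (List Int)) (labels : List Int) (objs : List Int) : Prop :=
  ∀ s ∈ syms.take (min boxes.length (min syms.length (min labels.length objs.length))), s ≠ []
instance (boxes : List (List Int)) (syms : List (List Int)) (labels : List Int) (objs : List Int) : Decidable (Pre_reshuffle boxes syms labels objs) := by unfold Pre_reshuffle; infer_instance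

def pvWitness_reshuffle : List (List Int) × List (List Int) × List Int × List Int :=
  ([[1], [2], [3]], [[10, 0], [4], [10]], [7, 8, 9], [1, 2, 3])

def Spec_reshuffle (boxes : List (List Int)) (syms : List (List Int)) (labels : List Int) (objs : List Int) (out : List (List Int) × List (List Int) × List Int × List Int) : Prop := out = reshuffle_alt boxes syms labels objs
instance (boxes : List (List Int)) (syms : List (List Int)) (labels : List Int) (objs : List Int) (out : List (List Int) × List (List Int) × List Int × List Int) : Decidable (Spec_reshuffle boxes syms labels objs out) := by unfold Spec_reshuffle; infer_instance

-- ===== CLAIM (what is proved, stated in full; the proofs are below) =====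
def Claim_equal_reshuffle : Prop := ∀ (boxes : List (List Int)) (syms : List (List Int)) (labels : List Int) (objs : List Int), Dom_reshuffle boxes syms labels objs → Pre_reshuffle boxes syms labels objs → Spec_reshuffle boxes syms labels objs (reshuffle boxes syms labels objs)

-- ===== LEMMAS AND PROOFS =====
theorem reshuffleLoop_split (q : List (List Int × List Int × Int × Int))
    (nb ns : List (List Int)) (nl no : List Int) :
    reshuffleLoop q (nb, ns, nl, no) =
      ((reshuffleSplit q).2.reverse.map (·.1) ++ nb ++ (reshuffleSplit q).1.map (·.1),
       (reshuffleSplit q).2.reverse.map (·.2.1) ++ ns ++ (reshuffleSplit q).1.map (·.2.1),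
       (reshuffleSplit q).2.reverse.map (·.2.2.1) ++ nl ++ (reshuffleSplit q).1.map (·.2.2.1),
       (reshuffleSplit q).2.reverse.map (·.2.2.2) ++ no ++ (reshuffleSplit q).1.map (·.2.2.2)) := by
  induction q generalizing nb ns nl no with
  | nil => simp [reshuffleLoop, reshuffleSplit]
  | cons x rest ih =>
    obtain ⟨b, s, l, o⟩ := x
    by_cases h : s.headI == 10
    · simp [reshuffleLoop, reshuffleSplit, h, ih]
    · simp [reshuffleLoop, reshuffleSplit, h, ih]

-- ===== VERDICT (by name: the statement is the Claim_ definition above) =====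
theorem reshuffle_spec : Claim_equal_reshuffle := by
  intro boxes syms labels objs _ _
  show reshuffle boxes syms labels objs = reshuffle_alt boxes syms labels objs
  simp [reshuffle, reshuffle_alt, reshuffleLoop_split, List.map_append, List.map_reverse]
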